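-- pv_equiv track=rewrite | github.com/saguilarDevel/openSCHC_hack106 | pybinutil.py | bitget
-- ===== SOURCE A (Python) =====
-- def bitget(ba, pos, val=None):
--     '''
--     val: if the type of val is None, this gets a value of the bit
--         from the position.
--
--         if the type is int, this gets a series of value of the bits
--         from the position and return the integer of the value.
--     '''
--     p0 = pos >> 3
--     p1 = pos % 8
--     guard_pos = len(ba) * 8
--     if val is None:
--         b = zfill(bin(ba[p0])[2:], 8)
--         return 1 if b[p1] == "1" else 0
--     elif type(val) is int:
--         ret = ""
--         for i in range(val):
--             ret += "1" if bitget(ba, pos+i) else "0"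
--         return int(ret, 2)
--     else:
--         raise ValueError("invalid val, not allow %s" % (type(val)))
--
-- def zfill(s, w):
--     '''
--     pycom doesn't support str.zfill()
--     '''
--     return "".join(["0" for i in range(w-len(s))]) + s
-- ===== SOURCE B (Python) =====
-- def bitget(ba, pos, val=None):
--     '''
--     val None: the bit of ba at bit position pos (MSB-first within a byte).
--     val int:  the integer formed by the val bits of ba starting at pos.
--     '''
--     if val is None:
--         return (ba[pos >> 3] >> (7 - pos % 8)) & 1
--     elif type(val) is int:
--         acc, i, end = 0, pos, pos + val
--         while i < end:
--             off = i % 8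
--             take = min(8 - off, end - i)
--             acc = (acc << take) | ((ba[i >> 3] >> (8 - off - take)) & ((1 << take) - 1))
--             i += take
--         return acc
--     else:
--         raise ValueError("invalid val, not allow %s" % (type(val)))
-- ===== Notes on version B (the rewrite author's own statement) =====
-- stated objective: alternative
-- what changed: B replaces A's per-bit recursion through bin()/zfill string rendering and the final int(ret,2) parse by pure shift/mask arithmetic on the byte elements, consuming the requested bit range in byte-aligned chunks instead of bit by bit; Pre_ restricts ba's elements to the byte range 0..255 (ba is a bytearray in this module, whose elements are always bytes) because on wider or negative elements A's bin()/zfill rendering reads accidental leading characters of the binary string.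
-- outside the precondition, e.g. on bitget([300], 0, None): A returns 1, B returns 0
-- crash fix: For val = some v with v <= 0 Python A raises ValueError (int('', 2) on the empty digit string); B returns 0. — e.g. on bitget([1], 0, some 0): A raises ValueError, B returns 0
import Mathlib
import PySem

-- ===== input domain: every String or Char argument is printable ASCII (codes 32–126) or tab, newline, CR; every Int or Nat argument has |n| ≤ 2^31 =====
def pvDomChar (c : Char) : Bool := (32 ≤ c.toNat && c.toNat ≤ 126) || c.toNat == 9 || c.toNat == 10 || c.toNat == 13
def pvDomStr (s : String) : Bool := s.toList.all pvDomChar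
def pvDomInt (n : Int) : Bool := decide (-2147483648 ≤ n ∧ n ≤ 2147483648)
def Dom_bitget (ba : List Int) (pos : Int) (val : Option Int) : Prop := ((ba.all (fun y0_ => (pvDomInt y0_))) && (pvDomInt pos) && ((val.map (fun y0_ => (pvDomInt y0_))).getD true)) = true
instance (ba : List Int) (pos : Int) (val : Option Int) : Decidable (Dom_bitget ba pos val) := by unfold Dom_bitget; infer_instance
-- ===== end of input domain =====

-- B replaces A's per-bit recursion through bin()/zfill string rendering and int(ret,2)
-- parsing by shift/mask arithmetic directly on the byte elements, walking byte-aligned chunks.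

-- ===== PORT A =====

-- A's module helper zfill(s, w) = "".join(["0" for i in range(w - len(s))]) + s
-- (each joined piece is the single character '0', so the join is exactly this append; exact)
def zfillA (s : List Char) (w : Int) : List Char :=
  ((PySem.List.pyRange 0 (w - PySem.List.len s)).map (fun _ => '0')) ++ s

-- A's val=None branch (A's recursive calls all pass val=None, so they re-enter exactly here).
-- ba[p0] raises IndexError out of range (excluded by Pre_): total form via pyGet?/getD.
-- b[p1] always succeeds (0 ≤ p1 < 8 ≤ len b), so the getD default ' ' is never used.
def bitgetNone (ba : List Int) (pos : Int) : Int :=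
  let p0 := pos >>> (3 : Nat)
  let p1 := PySem.Int.mod pos 8
  let b := zfillA (PySem.List.slice (PySem.Int.toBinChars0b ((PySem.List.pyGet? ba p0).getD 0)) (some 2)) 8
  if (PySem.List.pyGet? b p1).getD ' ' = '1' then 1 else 0

-- A itself; val : Option Int has no third case, so the else-ValueError branch is unreachable.
-- int(ret, 2): ret is built just above out of '0'/'1' characters only, so for ret ≠ [] it is
-- exactly this fold (exact); int('', 2) (reached iff val = some v, v ≤ 0) raises ValueError,
-- excluded by Pre_ (and documented in Raises_).
def bitget (ba : List Int) (pos : Int) (val : Option Int) : Int :=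
  match val with
  | none => bitgetNone ba pos
  | some v =>
    let ret := (PySem.List.pyRange 0 v).foldl
      (fun ret i => ret ++ [if bitgetNone ba (pos + i) ≠ 0 then '1' else '0']) ([] : List Char)
    ret.foldl (fun a c => 2 * a + (if c = '1' then 1 else 0)) 0

-- ===== PORT B =====

-- Source B's while-loop of the int branch; the loop advances by take ≥ 1 each pass, so the
-- fuel parameter (called with the bit count, an upper bound on the passes) is only a
-- structural-termination guard, never reached before i ≥ endp.
def chunkB (ba : List Int) (endp : Int) : Nat → Int → Int → Int
  | 0, _, acc => acc
  | fuel + 1, i, acc =>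
    if i < endp then
      let off := PySem.Int.mod i 8
      let take := min (8 - off) (endp - i)
      chunkB ba endp fuel (i + take)
        (PySem.Int.bor (acc <<< take.toNat)
          (PySem.Int.band (((PySem.List.pyGet? ba (i >>> (3 : Nat))).getD 0) >>> (8 - off - take).toNat)
            ((1 <<< take.toNat) - 1)))
    else acc

def bitget_alt (ba : List Int) (pos : Int) (val : Option Int) : Int :=
  match val with
  | none =>
    PySem.Int.band
      (((PySem.List.pyGet? ba (pos >>> (3 : Nat))).getD 0) >>> (7 - PySem.Int.mod pos 8).toNat) 1
  | some v => chunkB ba (pos + v) v.toNat pos 0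

-- ===== PRECONDITION & SPEC =====

-- Pre_ = the function's natural domain, on which Python A returns: ba is a bytearray, so its
-- elements are bytes 0..255 (on wider or negative elements A's bin()/zfill rendering reads
-- accidental leading characters of the binary string — excluded as outside the bytearray
-- domain, and A still returns there); the accessed byte indices are in Python range (else
-- IndexError); and for the int mode val ≥ 1 (int('', 2) raises ValueError for val ≤ 0).
-- The accessed indices pos>>3 … (pos+v-1)>>3 are monotone, so the endpoints cover every access.
def Pre_bitget (ba : List Int) (pos : Int) (val : Option Int) : Prop :=
  (∀ x ∈ ba, 0 ≤ x ∧ x < 256) ∧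
  match val with
  | none => PySem.Raise.InRange ba.length (pos >>> (3 : Nat))
  | some v => 1 ≤ v ∧ PySem.Raise.InRange ba.length (pos >>> (3 : Nat)) ∧
      PySem.Raise.InRange ba.length ((pos + v - 1) >>> (3 : Nat))

instance (ba : List Int) (pos : Int) (val : Option Int) : Decidable (Pre_bitget ba pos val) := by
  unfold Pre_bitget; cases val <;> exact instDecidableAnd

def pvWitness_bitget : List Int × Int × Option Int := ([170, 15], 4, some 8)

-- For val = some v with v ≤ 0 Python A raises ValueError (int('', 2) on the empty digit string); B returns 0.
def Raises_bitget (ba : List Int) (pos : Int) (val : Option Int) : Prop :=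
  match val with
  | none => False
  | some v => v ≤ 0

instance (ba : List Int) (pos : Int) (val : Option Int) : Decidable (Raises_bitget ba pos val) := by
  unfold Raises_bitget; cases val <;> infer_instance

def pvRaiseWitness_bitget : List Int × Int × Option Int := ([1], 0, some 0)
def pvRaiseWitnessOut_bitget : Int := 0

def Spec_bitget (ba : List Int) (pos : Int) (val : Option Int) (out : Int) : Prop := out = bitget_alt ba pos val
instance (ba : List Int) (pos : Int) (val : Option Int) (out : Int) : Decidable (Spec_bitget ba pos val out) := by unfold Spec_bitget; infer_instance

-- ===== CLAIM (what is proved, stated in full; the proofs are below) =====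
def Claim_equal_bitget : Prop := ∀ (ba : List Int) (pos : Int) (val : Option Int), Dom_bitget ba pos val → Pre_bitget ba pos val → Spec_bitget ba pos val (bitget ba pos val)

def Claim_raises_bitget : Prop := (∀ (ba : List Int) (pos : Int) (val : Option Int), Dom_bitget ba pos val → Raises_bitget ba pos val → ¬ Pre_bitget ba pos val) ∧ (Dom_bitget (pvRaiseWitness_bitget.1) (pvRaiseWitness_bitget.2.1) (pvRaiseWitness_bitget.2.2) ∧ Raises_bitget (pvRaiseWitness_bitget.1) (pvRaiseWitness_bitget.2.1) (pvRaiseWitness_bitget.2.2) ∧ bitget_alt (pvRaiseWitness_bitget.1) (pvRaiseWitness_bitget.2.1) (pvRaiseWitness_bitget.2.2) = pvRaiseWitnessOut_bitget)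

-- ===== LEMMAS AND PROOFS =====

-- B's single-bit read, as reused by the proofs (definitionally bitget_alt's none branch)
def bitI (ba : List Int) (j : Int) : Int :=
  PySem.Int.band
    (((PySem.List.pyGet? ba (j >>> (3 : Nat))).getD 0) >>> (7 - PySem.Int.mod j 8).toNat) 1

-- the fetched element is a byte whenever every element of ba is
lemma elem_range (ba : List Int) (hba : ∀ x ∈ ba, 0 ≤ x ∧ x < 256) (i : Int) :
    0 ≤ (PySem.List.pyGet? ba i).getD 0 ∧ (PySem.List.pyGet? ba i).getD 0 < 256 := by
  cases hg : PySem.List.pyGet? ba i with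
  | none => simp
  | some x =>
    have := hba x (PySem.List.mem_of_pyGet?_eq_some ba hg)
    simpa using this

-- ---- arithmetic bridges ----

lemma sr3_eq_floordiv (i : Int) : i >>> (3 : Nat) = PySem.Int.floordiv i 8 := by
  rw [Int.shiftRight_eq_div_pow, PySem.Int.floordiv_eq_ediv_of_pos (by norm_num)]
  norm_num

lemma mod_floordiv_add (i t : Int) (ht : 0 ≤ t) (hlt : PySem.Int.mod i 8 + t < 8) :
    PySem.Int.mod (i + t) 8 = PySem.Int.mod i 8 + t ∧
      PySem.Int.floordiv (i + t) 8 = PySem.Int.floordiv i 8 := by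
  have h1 := PySem.Int.floordiv_mul_add_mod i 8
  have h2 := PySem.Int.floordiv_mul_add_mod (i + t) 8
  have h3 := PySem.Int.mod_nonneg i (b := 8) (by norm_num)
  have h4 := PySem.Int.mod_lt i (b := 8) (by norm_num)
  have h5 := PySem.Int.mod_nonneg (i + t) (b := 8) (by norm_num)
  have h6 := PySem.Int.mod_lt (i + t) (b := 8) (by norm_num)
  constructor <;> omega

lemma bitLength_le_of_lt (k : Nat) : ∀ m : Nat, m < 2 ^ k → PySem.Int.bitLength (m : Int) ≤ k := by
  induction k with
  | zero =>
    intro m h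
    have hm : m = 0 := by omega
    subst hm
    rw [show ((0 : Nat) : Int) = 0 by norm_num, PySem.Int.bitLength_zero]
  | succ k ih =>
    intro m h
    by_cases hm : m = 0
    · subst hm
      rw [show ((0 : Nat) : Int) = 0 by norm_num, PySem.Int.bitLength_zero]
      omega
    · rw [PySem.Int.bitLength_natCast (by omega)]
      have h2 : 2 ^ (k + 1) = 2 * 2 ^ k := by ring
      have := ih (m / 2) (by omega)
      omega

-- ---- the binary digit string of Nat.toDigits 2 ----

def natChars (n : Nat) : List Char :=
  if h : n / 2 = 0 then [Nat.digitChar (n % 2)]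
  else natChars (n / 2) ++ [Nat.digitChar (n % 2)]
termination_by n
decreasing_by omega

lemma toDigitsCore_eq_natChars :
    ∀ (fuel n : Nat) (ds : List Char), n < fuel →
      Nat.toDigitsCore 2 fuel n ds = natChars n ++ ds := by
  intro fuel
  induction fuel with
  | zero => intro n ds h; omega
  | succ f ih =>
    intro n ds h
    rw [Nat.toDigitsCore, natChars]
    by_cases h2 : n / 2 = 0
    · simp [h2]
    · simp only [h2, if_false]
      rw [ih (n / 2) _ (by omega)]
      simp

lemma toDigits_eq_natChars (n : Nat) : Nat.toDigits 2 n = natChars n := by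
  rw [Nat.toDigits, toDigitsCore_eq_natChars _ _ _ (by omega)]
  simp

lemma natChars_length_pos (n : Nat) : 0 < (natChars n).length := by
  rw [natChars]; split <;> simp

lemma bitLength_nat_pos (m : Nat) (h : 0 < m) : 1 ≤ PySem.Int.bitLength (m : Int) := by
  by_contra hb
  have h1 := PySem.Int.lt_two_pow_bitLength (m : Int)
  rw [Int.natAbs_natCast] at h1
  have h0 : PySem.Int.bitLength (m : Int) = 0 := by omega
  rw [h0, pow_zero] at h1
  omega

lemma natChars_length (m : Nat) :
    (natChars m).length = max (PySem.Int.bitLength (m : Int)) 1 := by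
  induction m using natChars.induct with
  | case1 n h =>
    rw [natChars, dif_pos h]
    have hn : n = 0 ∨ n = 1 := by omega
    rcases hn with rfl | rfl
    · rw [show ((0:Nat):Int) = 0 by norm_num, PySem.Int.bitLength_zero]
      simp
    · have h1 : PySem.Int.bitLength ((1:Nat) : Int) = 1 := by
        have := PySem.Int.bitLength_natCast (m := 1) (by norm_num)
        rw [show ((1:Nat)/2 : Nat) = 0 by norm_num] at this
        rw [this, show ((0:Nat):Int) = 0 by norm_num, PySem.Int.bitLength_zero]
      rw [h1]
      simp
  | case2 n h ih =>
    rw [natChars, dif_neg h]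
    have hn : 0 < n := by omega
    have hd : 0 < n / 2 := by omega
    have hb := PySem.Int.bitLength_natCast (m := n) hn
    have hb2 := bitLength_nat_pos (n / 2) hd
    simp only [List.length_append, List.length_singleton, ih]
    omega

lemma testBit_of_bitLength_le (m r : Nat) (h : PySem.Int.bitLength (m : Int) ≤ r) :
    m.testBit r = false := by
  apply Nat.testBit_lt_two_pow
  have h1 := PySem.Int.lt_two_pow_bitLength (m : Int)
  rw [Int.natAbs_natCast] at h1
  calc m < 2 ^ PySem.Int.bitLength (m : Int) := h1
    _ ≤ 2 ^ r := Nat.pow_le_pow_right (by norm_num) h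

lemma natChars_get (m : Nat) :
    ∀ (r : Nat), r < (natChars m).length →
      (natChars m)[(natChars m).length - 1 - r]? =
        some (if m.testBit r = true then '1' else '0') := by
  induction m using natChars.induct with
  | case1 n h =>
    intro r hr
    rw [natChars, dif_pos h] at hr ⊢
    simp only [List.length_singleton] at hr ⊢
    have hr0 : r = 0 := by omega
    subst hr0
    have hn : n = 0 ∨ n = 1 := by omega
    rcases hn with rfl | rfl <;> simp [Nat.digitChar]
  | case2 n h ih =>
    intro r hr
    rw [natChars, dif_neg h] at hr ⊢
    have hpos := natChars_length_pos (n / 2)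
    simp only [List.length_append, List.length_singleton] at hr ⊢
    rcases r with _ | r'
    · rw [List.getElem?_append_right (by omega)]
      have hidx : (natChars (n / 2)).length + 1 - 1 - 0 - (natChars (n / 2)).length = 0 := by omega
      rw [hidx]
      simp only [List.getElem?_cons_zero]
      have h2 := Nat.mod_two_eq_zero_or_one n
      rcases h2 with h2 | h2 <;>
        simp [Nat.testBit_zero, h2, Nat.digitChar]
    · have hr' : r' < (natChars (n / 2)).length := by omega
      have hidx : (natChars (n / 2)).length + 1 - 1 - (r' + 1)
          = (natChars (n / 2)).length - 1 - r' := by omega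
      rw [hidx, List.getElem?_append_left (by omega), ih r' hr']
      congr 1
      rw [Nat.testBit_succ]

-- ---- single-bit shift/mask read as a testBit ----

lemma band_shift_one (e : Int) (he : 0 ≤ e) (k : Nat) :
    PySem.Int.band (e >>> k) 1 = if e.toNat.testBit k then 1 else 0 := by
  have hb : e = ((e.toNat : Nat) : Int) := (Int.toNat_of_nonneg he).symm
  rw [hb, ← Int.natCast_shiftRight, show (1 : Int) = ((1 : Nat) : Int) by norm_num,
    PySem.Int.band_natCast, Int.toNat_natCast, Nat.and_one_is_mod]
  have ht0 : ((e.toNat >>> k)).testBit 0 = (e.toNat).testBit k := by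
    rw [Nat.testBit_shiftRight, Nat.add_zero]
  rw [← ht0, Nat.testBit_zero]
  rcases Nat.mod_two_eq_zero_or_one (e.toNat >>> k) with h | h <;> simp [h]

-- ---- A's character read equals B's testBit ----

lemma pyRange_map_const (x : Int) (c : Char) :
    (PySem.List.pyRange 0 x).map (fun _ => c) = List.replicate x.toNat c := by
  rw [PySem.List.pyRange_one, List.map_map]
  have : ((fun _ => c) ∘ fun k : Nat => (0 : Int) + (k : Int)) = (fun _ => c) := rfl
  rw [this, List.map_const', List.length_range]
  congr 1
  omega

lemma zfill_char_one (e : Int) (k : Nat) (hk : k < 8) :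
    ((PySem.List.pyGet? (zfillA (PySem.List.slice (PySem.Int.toBinChars0b e) (some 2)) 8) (k : Int)).getD ' ' = '1')
      ↔ e.natAbs.testBit
          (max (max (PySem.Int.bitLength ((e.natAbs : Nat) : Int)) 1 + (if e < 0 then 1 else 0)) 8 - 1 - k)
          = true := by
  set m := e.natAbs with hm
  set D := max (PySem.Int.bitLength ((m : Nat) : Int)) 1 with hD
  have hDpos : 1 ≤ D := le_max_right _ _
  have hDlen : (natChars m).length = D := natChars_length m
  have htbf : ∀ r, D ≤ r → m.testBit r = false := by
    intro r hr
    exact testBit_of_bitLength_le m r (le_trans (le_max_left _ _) hr)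
  by_cases he : e < 0
  · -- negative element: bin(e)[2:] = 'b' followed by the digits of |e|
    have hchars : PySem.List.slice (PySem.Int.toBinChars0b e) (some 2) = 'b' :: natChars m := by
      rw [PySem.List.slice_from _ (a := 2) (by norm_num)]
      unfold PySem.Int.toBinChars0b
      rw [if_pos he, toDigits_eq_natChars]
      rfl
    rw [hchars]
    unfold zfillA
    rw [PySem.List.len_eq, pyRange_map_const, PySem.List.pyGet?_natCast]
    simp only [if_pos he]
    have hlen : ('b' :: natChars m).length = D + 1 := by simp [hDlen]
    set p := ((8 : Int) - (('b' :: natChars m).length : Int)).toNat with hp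
    have hp' : p = 8 - (D + 1) := by rw [hp, hlen]; omega
    have hmax : max (D + 1) 8 = p + D + 1 := by omega
    rw [show max (D + 1) 8 - 1 - k = p + D - k by omega]
    have hrep : (List.replicate p '0').length = p := List.length_replicate
    by_cases h1 : k < p
    · rw [List.getElem?_append_left (by omega), List.getElem?_replicate, if_pos h1,
        htbf (p + D - k) (by omega)]
      simp
    · rw [List.getElem?_append_right (by omega), hrep]
      by_cases h2 : k - p = 0
      · rw [h2, List.getElem?_cons_zero, htbf (p + D - k) (by omega)]
        simp
      · set j := k - p - 1 with hj
        have hj8 : j < D := by omega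
        rw [show k - p = j + 1 by omega, List.getElem?_cons_succ]
        have hget := natChars_get m (D - 1 - j) (by omega)
        rw [hDlen] at hget
        rw [show j = D - 1 - (D - 1 - j) by omega, hget,
          show p + D - k = D - 1 - j by omega]
        split <;> simp_all
  · -- nonnegative element: bin(e)[2:] = the digits of e
    have hchars : PySem.List.slice (PySem.Int.toBinChars0b e) (some 2) = natChars m := by
      rw [PySem.List.slice_from _ (a := 2) (by norm_num)]
      unfold PySem.Int.toBinChars0b
      rw [if_neg he, toDigits_eq_natChars,
        show e.toNat = m by rw [hm]; omega]
      rfl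
    rw [hchars]
    unfold zfillA
    rw [PySem.List.len_eq, pyRange_map_const, PySem.List.pyGet?_natCast]
    simp only [if_neg he]
    set p := ((8 : Int) - ((natChars m).length : Int)).toNat with hp
    have hp' : p = 8 - D := by rw [hp, hDlen]; omega
    have hmax : max (D + 0) 8 = p + D := by omega
    rw [show max (D + 0) 8 - 1 - k = p + D - 1 - k by omega]
    have hrep : (List.replicate p '0').length = p := List.length_replicate
    by_cases h1 : k < p
    · rw [List.getElem?_append_left (by omega), List.getElem?_replicate, if_pos h1,
        htbf (p + D - 1 - k) (by omega)]
      simp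
    · set j := k - p with hj
      have hj8 : j < D := by omega
      rw [List.getElem?_append_right (by omega), hrep]
      have hget := natChars_get m (D - 1 - j) (by omega)
      rw [hDlen] at hget
      rw [show k - p = D - 1 - (D - 1 - j) by omega, hget,
        show p + D - 1 - k = D - 1 - j by omega]
      split <;> simp_all

lemma bitgetNone_def (ba : List Int) (pos : Int) :
    bitgetNone ba pos =
      if (PySem.List.pyGet?
            (zfillA (PySem.List.slice
                (PySem.Int.toBinChars0b ((PySem.List.pyGet? ba (pos >>> (3 : Nat))).getD 0)) (some 2)) 8)
            (PySem.Int.mod pos 8)).getD ' ' = '1'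
      then 1 else 0 := rfl

lemma bitgetNone_eq_bitI (ba : List Int) (pos : Int)
    (hba : ∀ x ∈ ba, 0 ≤ x ∧ x < 256) : bitgetNone ba pos = bitI ba pos := by
  rw [bitgetNone_def]
  unfold bitI
  set e := (PySem.List.pyGet? ba (pos >>> (3 : Nat))).getD 0 with he
  have her := elem_range ba hba (pos >>> (3 : Nat))
  rw [← he] at her
  have h3 := PySem.Int.mod_nonneg pos (b := 8) (by norm_num)
  have h4 := PySem.Int.mod_lt pos (b := 8) (by norm_num)
  set k := (PySem.Int.mod pos 8).toNat with hk
  have hkc : PySem.Int.mod pos 8 = (k : Int) := by omega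
  have hk8 : k < 8 := by omega
  rw [hkc, show ((7 : Int) - (k : Int)).toNat = 7 - k from by omega,
    band_shift_one e her.1 (7 - k)]
  have hbl : PySem.Int.bitLength ((e.natAbs : Nat) : Int) ≤ 8 := by
    apply bitLength_le_of_lt
    show e.natAbs < 2 ^ 8
    omega
  have hidx : max (max (PySem.Int.bitLength ((e.natAbs : Nat) : Int)) 1 + (if e < 0 then 1 else 0)) 8 - 1 - k
      = 7 - k := by
    rw [if_neg (by omega : ¬ e < 0)]
    omega
  have hna : e.natAbs = e.toNat := by omega
  have hch := zfill_char_one e k hk8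
  rw [hidx, hna] at hch
  by_cases hc : (PySem.List.pyGet? (zfillA (PySem.List.slice (PySem.Int.toBinChars0b e) (some 2)) 8) ((k : Nat) : Int)).getD ' ' = '1'
  · rw [if_pos hc, hch.mp hc]
    simp
  · rw [if_neg hc]
    have : ¬ e.toNat.testBit (7 - k) = true := fun h => hc (hch.mpr h)
    simp only [Bool.not_eq_true] at this
    rw [this]
    simp

-- ---- A's some-branch equals the bit fold ----

lemma foldl_pyRange_shift (g : Int → Int → Int) (pos v : Int) (init : Int) :
    (PySem.List.pyRange 0 v).foldl (fun a i => g a (pos + i)) init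
      = (PySem.List.pyRange pos (pos + v)).foldl g init := by
  rw [PySem.List.pyRange_one, PySem.List.pyRange_one]
  simp only [List.foldl_map, zero_add, sub_zero]
  have hv : (pos + v - pos) = v := by ring
  rw [hv]

lemma bitgetNone_cases (ba : List Int) (p : Int) :
    bitgetNone ba p = 0 ∨ bitgetNone ba p = 1 := by
  rw [bitgetNone_def]
  split <;> simp

lemma A_some_eq (ba : List Int) (pos v : Int) (hba : ∀ x ∈ ba, 0 ≤ x ∧ x < 256) :
    bitget ba pos (some v)
      = (PySem.List.pyRange pos (pos + v)).foldl (fun a j => 2 * a + bitI ba j) 0 := by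
  show (((PySem.List.pyRange 0 v).foldl
      (fun ret i => ret ++ [if bitgetNone ba (pos + i) ≠ 0 then '1' else '0']) ([] : List Char)).foldl
      (fun a c => 2 * a + (if c = '1' then 1 else 0)) 0) = _
  rw [PySem.List.foldl_append_singleton_eq_map]
  simp only [List.nil_append, List.foldl_map]
  have hpt : ∀ (a i : Int),
      2 * a + (if (if bitgetNone ba (pos + i) ≠ 0 then '1' else '0') = '1' then (1 : Int) else 0)
        = 2 * a + bitI ba (pos + i) := by
    intro a i
    rcases bitgetNone_cases ba (pos + i) with h | h <;>
      rw [← bitgetNone_eq_bitI ba (pos + i) hba] <;> simp [h]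
  simp only [hpt]
  exact foldl_pyRange_shift (fun a j => 2 * a + bitI ba j) pos v 0

-- ---- B's chunk loop equals the bit fold ----

lemma or_shiftLeft_add (a f t : Nat) (hf : f < 2 ^ t) :
    a <<< t ||| f = a * 2 ^ t + f := by
  have hmod : (a <<< t ||| f) % 2 ^ t = f := by
    rw [← Nat.and_two_pow_sub_one_eq_mod, Nat.and_or_distrib_right,
      Nat.and_two_pow_sub_one_eq_mod, Nat.and_two_pow_sub_one_eq_mod,
      Nat.shiftLeft_eq, Nat.mul_mod_left, Nat.mod_eq_of_lt hf]
    simp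
  have hdiv : (a <<< t ||| f) / 2 ^ t = a := by
    rw [← Nat.shiftRight_eq_div_pow, Nat.shiftRight_or_distrib,
      Nat.shiftLeft_shiftRight, Nat.shiftRight_eq_div_pow,
      Nat.div_eq_of_lt hf]
    simp
  have := Nat.div_add_mod (a <<< t ||| f) (2 ^ t)
  rw [hmod, hdiv] at this
  rw [← this]
  ring

lemma chunk_step_cast (e : Int) (he : 0 ≤ e) (acc t sN : Nat) :
    PySem.Int.bor (((acc : Nat) : Int) <<< t)
        (PySem.Int.band (e >>> sN) ((1 <<< t) - 1))
      = ((acc * 2 ^ t + (e.toNat >>> sN) % 2 ^ t : Nat) : Int) := by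
  have hb : e = ((e.toNat : Nat) : Int) := (Int.toNat_of_nonneg he).symm
  rw [hb, ← Int.natCast_shiftRight, Int.toNat_natCast]
  have hmask : ((((1 : Nat) <<< t : Nat) : Int)) - 1 = (((2 ^ t - 1 : Nat)) : Int) := by
    rw [Nat.shiftLeft_eq, one_mul, Nat.cast_sub Nat.one_le_two_pow]
    simp
  rw [hmask, PySem.Int.band_natCast, ← Int.natCast_shiftLeft, PySem.Int.bor_natCast,
    Nat.and_two_pow_sub_one_eq_mod,
    or_shiftLeft_add _ _ _ (Nat.mod_lt _ (by positivity))]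

lemma chunk_fold (ba : List Int) (hba : ∀ x ∈ ba, 0 ≤ x ∧ x < 256)
    (i : Int) (t : Nat) (acc : Nat)
    (ht : (t : Int) ≤ 8 - PySem.Int.mod i 8) :
    (PySem.List.pyRange i (i + (t : Int))).foldl (fun a j => 2 * a + bitI ba j) ((acc : Nat) : Int)
      = ((acc * 2 ^ t +
          (((PySem.List.pyGet? ba (i >>> (3 : Nat))).getD 0).toNat
            >>> (8 - (PySem.Int.mod i 8).toNat - t)) % 2 ^ t : Nat) : Int) := by
  have hmn := PySem.Int.mod_nonneg i (b := 8) (by norm_num)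
  have hml := PySem.Int.mod_lt i (b := 8) (by norm_num)
  set offN := (PySem.Int.mod i 8).toNat with hoffN
  induction t with
  | zero =>
    rw [show i + ((0 : Nat) : Int) = i from by omega, PySem.List.pyRange_one_eq_nil (le_refl i)]
    simp
  | succ t' ih =>
    have ht' : (t' : Int) ≤ 8 - PySem.Int.mod i 8 := by push_cast at ht ⊢; omega
    have hsplit : PySem.List.pyRange i (i + ((t' + 1 : Nat) : Int))
        = PySem.List.pyRange i (i + (t' : Nat)) ++ [i + (t' : Nat)] := by
      have : i + ((t' + 1 : Nat) : Int) = (i + (t' : Nat)) + 1 := by push_cast; ring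
      rw [this, PySem.List.pyRange_one_succ_right (by omega)]
    rw [hsplit, List.foldl_append, ih ht']
    simp only [List.foldl_cons, List.foldl_nil]
    -- the new bit
    have hmadd := mod_floordiv_add i (t' : Nat) (by positivity)
      (by push_cast at ht ⊢; omega)
    set e := (PySem.List.pyGet? ba (i >>> (3 : Nat))).getD 0 with he
    have her := elem_range ba hba (i >>> (3 : Nat))
    rw [← he] at her
    have hsame : (PySem.List.pyGet? ba ((i + (t' : Nat)) >>> (3 : Nat))).getD 0 = e := by
      rw [he, sr3_eq_floordiv, sr3_eq_floordiv, hmadd.2]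
    have hmod2 : PySem.Int.mod (i + (t' : Nat)) 8 = (offN : Int) + (t' : Nat) := by
      rw [hmadd.1, hoffN]; omega
    have hbit : bitI ba (i + (t' : Nat))
        = if e.toNat.testBit (7 - offN - t') then 1 else 0 := by
      unfold bitI
      rw [hsame, hmod2]
      have h7 : ((7 : Int) - ((offN : Int) + (t' : Nat))).toNat = 7 - offN - t' := by
        push_cast at ht ⊢; omega
      rw [h7, band_shift_one e her.1]
    rw [hbit]
    -- numeric identity
    set b' := e.toNat with hb'
    have hofft : offN + t' ≤ 7 := by push_cast at ht; omega
    have hs1 : 8 - offN - t' = (8 - offN - (t' + 1)) + 1 := by omega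
    have htb : b'.testBit (7 - offN - t') = decide ((b' >>> (8 - offN - (t' + 1))) % 2 = 1) := by
      have heq77 : 7 - offN - t' = 8 - offN - (t' + 1) := by omega
      have h00 : (b' >>> (8 - offN - (t' + 1))).testBit 0
          = b'.testBit (8 - offN - (t' + 1)) := by
        have := Nat.testBit_shiftRight (x := b') (i := 8 - offN - (t' + 1)) (j := 0)
        simp only [Nat.add_zero] at this
        exact this
      rw [heq77, ← h00, Nat.testBit_zero]
    set y := b' >>> (8 - offN - (t' + 1)) with hy
    have hyd : b' >>> (8 - offN - t') = y / 2 := by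
      rw [hy, hs1, Nat.shiftRight_eq_div_pow, Nat.shiftRight_eq_div_pow, pow_succ,
        ← Nat.div_div_eq_div_mul]
    have hkey : y % 2 ^ (t' + 1) = y % 2 + 2 * (y / 2 % 2 ^ t') := by
      have := Nat.mod_mul (a := 2) (b := 2 ^ t') (x := y)
      rw [← pow_succ'] at this
      exact this
    rw [htb, hyd, hkey]
    rcases Nat.mod_two_eq_zero_or_one y with hy2 | hy2 <;>
      · rw [hy2]
        simp only [decide_eq_true_eq]
        push_cast
        ring_nf
        try omega
        try ring

lemma chunkB_eq (ba : List Int) (hba : ∀ x ∈ ba, 0 ≤ x ∧ x < 256) :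
    ∀ (fuel : Nat) (endp i : Int) (acc : Nat), (endp - i).toNat ≤ fuel →
      chunkB ba endp fuel i ((acc : Nat) : Int)
        = (PySem.List.pyRange i endp).foldl (fun a j => 2 * a + bitI ba j) ((acc : Nat) : Int) := by
  intro fuel
  induction fuel with
  | zero =>
    intro endp i acc h
    rw [PySem.List.pyRange_one_eq_nil (by omega)]
    rfl
  | succ k ih =>
    intro endp i acc h
    show (if i < endp then _ else _) = _
    by_cases hlt : i < endp
    · rw [if_pos hlt]
      dsimp only
      have hmn := PySem.Int.mod_nonneg i (b := 8) (by norm_num)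
      have hml := PySem.Int.mod_lt i (b := 8) (by norm_num)
      set off := PySem.Int.mod i 8 with hoff
      set take := min (8 - off) (endp - i) with htake
      have htpos : 1 ≤ take := by rw [htake]; omega
      have htle : take ≤ endp - i := by rw [htake]; omega
      have htle8 : take ≤ 8 - off := by rw [htake]; omega
      set t := take.toNat with ht
      have htc : take = (t : Int) := by omega
      set e := (PySem.List.pyGet? ba (i >>> (3 : Nat))).getD 0 with he
      have her := elem_range ba hba (i >>> (3 : Nat))
      rw [← he] at her
      have hsN : (8 - off - take).toNat = 8 - off.toNat - t := by omega
      have hstep : PySem.Int.bor (((acc : Nat) : Int) <<< take.toNat)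
          (PySem.Int.band (e >>> (8 - off - take).toNat) ((1 <<< take.toNat) - 1))
          = ((acc * 2 ^ t + (e.toNat >>> (8 - off.toNat - t)) % 2 ^ t : Nat) : Int) := by
        rw [hsN, ← ht]
        exact chunk_step_cast e her.1 acc t (8 - off.toNat - t)
      rw [hstep]
      rw [ih (endp) (i + take) _ (by omega)]
      rw [PySem.List.pyRange_one_append i (i + take) endp (by omega) (by omega), List.foldl_append]
      congr 1
      rw [htc] at *
      rw [← chunk_fold ba hba i t acc (by rw [← hoff]; omega)]
    · rw [if_neg hlt, PySem.List.pyRange_one_eq_nil (by omega)]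
      rfl

-- ===== VERDICT (by name: the statement is the Claim_ definition above) =====
theorem bitget_spec : Claim_equal_bitget := by
  unfold Claim_equal_bitget
  intro ba pos val _dom hpre
  obtain ⟨hba, hpre⟩ := hpre
  unfold Spec_bitget
  match val with
  | none =>
    show bitgetNone ba pos = _
    exact bitgetNone_eq_bitI ba pos hba
  | some v =>
    show bitget ba pos (some v) = chunkB ba (pos + v) v.toNat pos 0
    rw [A_some_eq ba pos v hba]
    rw [show (0 : Int) = (((0 : Nat) : Nat) : Int) by norm_num]
    rw [chunkB_eq ba hba v.toNat (pos + v) pos 0 (by omega)]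

theorem bitget_raises : Claim_raises_bitget := by
  unfold Claim_raises_bitget
  constructor
  · intro ba pos val _dom hr hp
    match val with
    | none => exact hr
    | some v =>
      unfold Raises_bitget at hr
      obtain ⟨_, hp⟩ := hp
      omega
  · refine ⟨by decide, by decide, by decide⟩

-- self-check of the crash-fix witness, read off bitget_raises
theorem pvRaiseWitnessOut_bitget_ok :
    Raises_bitget (pvRaiseWitness_bitget.1) (pvRaiseWitness_bitget.2.1) (pvRaiseWitness_bitget.2.2) ∧
      bitget_alt (pvRaiseWitness_bitget.1) (pvRaiseWitness_bitget.2.1) (pvRaiseWitness_bitget.2.2)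
        = pvRaiseWitnessOut_bitget :=
  ⟨bitget_raises.2.2.1, bitget_raises.2.2.2⟩
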